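-- pv_equiv track=rewrite | github.com/koszullab/metaTOR | metator/cutsite.py | write_pair
-- ===== SOURCE A (Python) =====
-- def write_pair(
--     new_reads_for,
--     new_reads_rev,
--     name,
--     for_seq_list,
--     for_qual_list,
--     rev_seq_list,
--     rev_qual_list,
--     mode,
--     final_number_of_pairs,
-- ):
--     """Function to write one pair with the combinations of fragment depending on
--     the chosen mode.
--
--     Parameters:
--     -----------
--     new_reads_for : str
--         Stack of the new forward reads ready to be written.
--     new_reads_rev : str
--         Stack of the new reverse reads ready to be written.
--     name : str
--         Name of the fastq read.
--     for_seq : str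
--         Forward sequence of the fastq read.
--     for_qual : str
--         Forward quality of the fastq read.
--     rev_seq : str
--         Reverse sequence of the fastq read.
--     rev_qual : str
--         Reverse quality of the fastq read.
--     mode : str
--         Mode to use to make the digestion. Three values possible: "all",
--         "for_vs_rev", "pile".
--     final_numbers_of_pairs : int
--         Count of pairs after cutting.
--
--     Returns:
--     --------
--     str
--         Stack of forward reads ready to be written with the last pairs added.
--     str
--         Stack of reverse reads ready to be written with the last pairs added.
--     int
--         Count of pairs after cutting.
--     """
--
--     # Mode "for_vs_rev": Make contacts only between fragments from different
--     # reads (one fragment from forward and one from reverse).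
--     if mode == "for_vs_rev":
--         for i in range(len(for_seq_list)):
--             for j in range(len(rev_seq_list)):
--                 final_number_of_pairs += 1
--                 new_reads_for += "@%s\n%s\n+\n%s\n" % (
--                     name + ":" + str(i) + str(j),
--                     for_seq_list[i],
--                     for_qual_list[i],
--                 )
--                 new_reads_rev += "@%s\n%s\n+\n%s\n" % (
--                     name + ":" + str(i) + str(j),
--                     rev_seq_list[j],
--                     rev_qual_list[j],
--                 )
--
--     #  Mode "all": Make all the possible contacts between the fragments.
--     elif mode == "all":
--         seq_list = for_seq_list + rev_seq_list
--         qual_list = for_qual_list + rev_qual_list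
--         for i in range(len(seq_list)):
--             for j in range(i + 1, len(seq_list)):
--                 final_number_of_pairs += 1
--                 new_reads_for += "@%s\n%s\n+\n%s\n" % (
--                     name + ":" + str(i) + str(j),
--                     seq_list[i],
--                     qual_list[i],
--                 )
--                 new_reads_rev += "@%s\n%s\n+\n%s\n" % (
--                     name + ":" + str(i) + str(j),
--                     seq_list[j],
--                     qual_list[j],
--                 )
--
--     # Mode "pile": Only make contacts bewteen two adjacent fragments.
--     elif mode == "pile":
--         seq_list = for_seq_list + rev_seq_list
--         qual_list = for_qual_list + rev_qual_list
--         for i in range(len(seq_list) - 1):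
--             final_number_of_pairs += 1
--             new_reads_for += "@%s\n%s\n+\n%s\n" % (
--                 name + ":" + str(i) + str(i + 1),
--                 seq_list[i],
--                 qual_list[i],
--             )
--             new_reads_rev += "@%s\n%s\n+\n%s\n" % (
--                 name + ":" + str(i) + str(i + 1),
--                 seq_list[i + 1],
--                 qual_list[i + 1],
--             )
--
--     return new_reads_for, new_reads_rev, final_number_of_pairs
-- ===== SOURCE B (Python) =====
-- def write_pair(
--     new_reads_for,
--     new_reads_rev,
--     name,
--     for_seq_list,
--     for_qual_list,
--     rev_seq_list,
--     rev_qual_list,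
--     mode,
--     final_number_of_pairs,
-- ):
--     """Unified pair enumeration: all three modes run ONE scan over the ordered
--     index pairs (i, j), i < j, of the combined fragment space, with a per-mode
--     predicate selecting which pairs are emitted and a per-mode view mapping a
--     combined index to its (seq, qual) data and a pair to its tag."""
--     nf = len(for_seq_list)
--     if mode == "for_vs_rev":
--         n = nf + len(rev_seq_list)
--         keep = lambda i, j: i < nf <= j
--         data = lambda k: (for_seq_list[k], for_qual_list[k]) if k < nf \
--             else (rev_seq_list[k - nf], rev_qual_list[k - nf])
--         tag = lambda i, j: str(i) + str(j - nf)
--     elif mode == "all" or mode == "pile":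
--         seq_list = for_seq_list + rev_seq_list
--         qual_list = for_qual_list + rev_qual_list
--         n = len(seq_list)
--         keep = (lambda i, j: True) if mode == "all" else (lambda i, j: j == i + 1)
--         data = lambda k: (seq_list[k], qual_list[k])
--         tag = lambda i, j: str(i) + str(j)
--     else:
--         return new_reads_for, new_reads_rev, final_number_of_pairs
--     for i in range(n):
--         for j in range(i + 1, n):
--             if keep(i, j):
--                 final_number_of_pairs += 1
--                 t = tag(i, j)
--                 s_i, q_i = data(i)
--                 s_j, q_j = data(j)
--                 new_reads_for += "@" + name + ":" + t + "\n" + s_i + "\n+\n" + q_i + "\n"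
--                 new_reads_rev += "@" + name + ":" + t + "\n" + s_j + "\n+\n" + q_j + "\n"
--     return new_reads_for, new_reads_rev, final_number_of_pairs
-- ===== Notes on version B (the rewrite author's own statement) =====
-- stated objective: alternative
-- what changed: B replaces A's three branch-specific emitting loops by one generic scan over all ordered index pairs (i, j), i < j, of the combined fragment space: each mode only supplies a keep-predicate (forward-index x reverse-index for 'for_vs_rev', everything for 'all', j == i+1 for 'pile') plus tag/data views, and a single shared nested loop filters the pairs and emits the two FASTQ blocks and the counter increment.
import Mathlib
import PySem

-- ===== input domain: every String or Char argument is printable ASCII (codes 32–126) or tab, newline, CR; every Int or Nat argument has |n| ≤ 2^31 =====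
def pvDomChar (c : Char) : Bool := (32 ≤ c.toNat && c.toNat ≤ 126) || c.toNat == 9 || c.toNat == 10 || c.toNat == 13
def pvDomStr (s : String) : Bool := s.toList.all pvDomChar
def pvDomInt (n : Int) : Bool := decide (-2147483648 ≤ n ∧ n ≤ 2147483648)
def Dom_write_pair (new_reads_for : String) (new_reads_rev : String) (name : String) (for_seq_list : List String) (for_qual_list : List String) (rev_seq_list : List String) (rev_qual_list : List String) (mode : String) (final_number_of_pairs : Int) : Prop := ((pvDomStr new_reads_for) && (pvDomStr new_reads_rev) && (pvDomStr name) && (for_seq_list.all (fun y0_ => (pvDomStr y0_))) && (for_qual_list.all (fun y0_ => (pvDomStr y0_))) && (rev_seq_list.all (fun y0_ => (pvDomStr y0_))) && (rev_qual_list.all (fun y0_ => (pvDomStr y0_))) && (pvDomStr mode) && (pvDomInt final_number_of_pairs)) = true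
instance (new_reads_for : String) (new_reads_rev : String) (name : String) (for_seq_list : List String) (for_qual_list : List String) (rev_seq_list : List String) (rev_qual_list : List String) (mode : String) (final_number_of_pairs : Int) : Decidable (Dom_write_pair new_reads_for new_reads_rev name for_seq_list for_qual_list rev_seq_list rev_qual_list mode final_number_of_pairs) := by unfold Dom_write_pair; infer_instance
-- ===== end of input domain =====

-- B replaces A's three branch-specific emitting loops by ONE scan over the ordered index
-- pairs (i, j), i < j, of the combined fragment space, with a per-mode keep-predicate and
-- per-mode tag/data views (objective: alternative decomposition, same output).


-- ===== PORT A =====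
-- xs[i]: total form of Python list indexing; exact under Pre_ (which puts every
-- performed index in range — out of range Python raises IndexError).
def pvIdx (xs : List String) (i : Int) : List Char := (PySem.List.pyGetD xs i "").toList

def write_pair (new_reads_for : String) (new_reads_rev : String) (name : String) (for_seq_list : List String) (for_qual_list : List String) (rev_seq_list : List String) (rev_qual_list : List String) (mode : String) (final_number_of_pairs : Int) : String × String × Int :=
  if mode = "for_vs_rev" then
    let r := (PySem.List.pyRange 0 (PySem.List.len for_seq_list) 1).foldl (fun st i =>
      (PySem.List.pyRange 0 (PySem.List.len rev_seq_list) 1).foldl (fun st2 j =>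
        (st2.1 ++ (['@'] ++ name.toList ++ [':'] ++ PySem.Int.toChars i ++ PySem.Int.toChars j ++ ['\n'] ++ pvIdx for_seq_list i ++ ['\n', '+', '\n'] ++ pvIdx for_qual_list i ++ ['\n']),
         st2.2.1 ++ (['@'] ++ name.toList ++ [':'] ++ PySem.Int.toChars i ++ PySem.Int.toChars j ++ ['\n'] ++ pvIdx rev_seq_list j ++ ['\n', '+', '\n'] ++ pvIdx rev_qual_list j ++ ['\n']),
         st2.2.2 + 1)) st) (new_reads_for.toList, new_reads_rev.toList, final_number_of_pairs)
    (String.ofList r.1, String.ofList r.2.1, r.2.2)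
  else if mode = "all" then
    let seq_list := for_seq_list ++ rev_seq_list
    let qual_list := for_qual_list ++ rev_qual_list
    let r := (PySem.List.pyRange 0 (PySem.List.len seq_list) 1).foldl (fun st i =>
      (PySem.List.pyRange (i + 1) (PySem.List.len seq_list) 1).foldl (fun st2 j =>
        (st2.1 ++ (['@'] ++ name.toList ++ [':'] ++ PySem.Int.toChars i ++ PySem.Int.toChars j ++ ['\n'] ++ pvIdx seq_list i ++ ['\n', '+', '\n'] ++ pvIdx qual_list i ++ ['\n']),
         st2.2.1 ++ (['@'] ++ name.toList ++ [':'] ++ PySem.Int.toChars i ++ PySem.Int.toChars j ++ ['\n'] ++ pvIdx seq_list j ++ ['\n', '+', '\n'] ++ pvIdx qual_list j ++ ['\n']),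
         st2.2.2 + 1)) st) (new_reads_for.toList, new_reads_rev.toList, final_number_of_pairs)
    (String.ofList r.1, String.ofList r.2.1, r.2.2)
  else if mode = "pile" then
    let seq_list := for_seq_list ++ rev_seq_list
    let qual_list := for_qual_list ++ rev_qual_list
    let r := (PySem.List.pyRange 0 (PySem.List.len seq_list - 1) 1).foldl (fun st i =>
        (st.1 ++ (['@'] ++ name.toList ++ [':'] ++ PySem.Int.toChars i ++ PySem.Int.toChars (i + 1) ++ ['\n'] ++ pvIdx seq_list i ++ ['\n', '+', '\n'] ++ pvIdx qual_list i ++ ['\n']),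
         st.2.1 ++ (['@'] ++ name.toList ++ [':'] ++ PySem.Int.toChars i ++ PySem.Int.toChars (i + 1) ++ ['\n'] ++ pvIdx seq_list (i + 1) ++ ['\n', '+', '\n'] ++ pvIdx qual_list (i + 1) ++ ['\n']),
         st.2.2 + 1)) (new_reads_for.toList, new_reads_rev.toList, final_number_of_pairs)
    (String.ofList r.1, String.ofList r.2.1, r.2.2)
  else
    (new_reads_for, new_reads_rev, final_number_of_pairs)

-- ===== PORT B =====
-- "@" + name + ":" + tag + "\n" + seq + "\n+\n" + qual + "\n"
def pvBlock (name : String) (tag seq qual : List Char) : List Char :=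
  ['@'] ++ name.toList ++ [':'] ++ tag ++ ['\n'] ++ seq ++ ['\n', '+', '\n'] ++ qual ++ ['\n']

def write_pair_alt (new_reads_for : String) (new_reads_rev : String) (name : String) (for_seq_list : List String) (for_qual_list : List String) (rev_seq_list : List String) (rev_qual_list : List String) (mode : String) (final_number_of_pairs : Int) : String × String × Int :=
  let nf : Int := PySem.List.len for_seq_list
  -- per-mode configuration: (n, keep, data, tag); none = unknown mode, return unchanged
  let cfg : Option (Int × (Int → Int → Bool) × (Int → List Char × List Char) × (Int → Int → List Char)) :=
    if mode = "for_vs_rev" then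
      some (nf + PySem.List.len rev_seq_list,
            fun i j => decide (i < nf ∧ nf ≤ j),
            fun k => if k < nf then (pvIdx for_seq_list k, pvIdx for_qual_list k)
                     else (pvIdx rev_seq_list (k - nf), pvIdx rev_qual_list (k - nf)),
            fun i j => PySem.Int.toChars i ++ PySem.Int.toChars (j - nf))
    else if mode = "all" ∨ mode = "pile" then
      let seq_list := for_seq_list ++ rev_seq_list
      let qual_list := for_qual_list ++ rev_qual_list
      some (PySem.List.len seq_list,
            if mode = "all" then (fun _ _ => true) else (fun i j => j == i + 1),
            fun k => (pvIdx seq_list k, pvIdx qual_list k),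
            fun i j => PySem.Int.toChars i ++ PySem.Int.toChars j)
    else none
  match cfg with
  | none => (new_reads_for, new_reads_rev, final_number_of_pairs)
  | some (n, keep, data, tag) =>
    let r := (PySem.List.pyRange 0 n 1).foldl (fun st i =>
      (PySem.List.pyRange (i + 1) n 1).foldl (fun st2 j =>
        if keep i j then
          (st2.1 ++ pvBlock name (tag i j) (data i).1 (data i).2,
           st2.2.1 ++ pvBlock name (tag i j) (data j).1 (data j).2,
           st2.2.2 + 1)
        else st2) st) (new_reads_for.toList, new_reads_rev.toList, final_number_of_pairs)
    (String.ofList r.1, String.ofList r.2.1, r.2.2)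

-- ===== PRECONDITION & SPEC =====
-- Pre_ excludes exactly the inputs where Python A raises IndexError (a quality list
-- too short for the sequence indices the chosen mode reads); A returns on all of Pre_.
def Pre_write_pair (new_reads_for : String) (new_reads_rev : String) (name : String) (for_seq_list : List String) (for_qual_list : List String) (rev_seq_list : List String) (rev_qual_list : List String) (mode : String) (final_number_of_pairs : Int) : Prop :=
  (mode = "for_vs_rev" → for_seq_list = [] ∨ rev_seq_list = [] ∨
      (for_seq_list.length ≤ for_qual_list.length ∧ rev_seq_list.length ≤ rev_qual_list.length)) ∧
  ((mode = "all" ∨ mode = "pile") → for_seq_list.length + rev_seq_list.length ≤ 1 ∨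
      for_seq_list.length + rev_seq_list.length ≤ for_qual_list.length + rev_qual_list.length)
instance (new_reads_for : String) (new_reads_rev : String) (name : String) (for_seq_list : List String) (for_qual_list : List String) (rev_seq_list : List String) (rev_qual_list : List String) (mode : String) (final_number_of_pairs : Int) : Decidable (Pre_write_pair new_reads_for new_reads_rev name for_seq_list for_qual_list rev_seq_list rev_qual_list mode final_number_of_pairs) := by unfold Pre_write_pair; infer_instance

def pvWitness_write_pair : String × String × String × List String × List String × List String × List String × String × Int :=
  ("", "", "r1", ["ACGT"], ["IIII"], ["TG"], ["JJ"], "for_vs_rev", 0)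

def Spec_write_pair (new_reads_for : String) (new_reads_rev : String) (name : String) (for_seq_list : List String) (for_qual_list : List String) (rev_seq_list : List String) (rev_qual_list : List String) (mode : String) (final_number_of_pairs : Int) (out : String × String × Int) : Prop := out = write_pair_alt new_reads_for new_reads_rev name for_seq_list for_qual_list rev_seq_list rev_qual_list mode final_number_of_pairs
instance (new_reads_for : String) (new_reads_rev : String) (name : String) (for_seq_list : List String) (for_qual_list : List String) (rev_seq_list : List String) (rev_qual_list : List String) (mode : String) (final_number_of_pairs : Int) (out : String × String × Int) : Decidable (Spec_write_pair new_reads_for new_reads_rev name for_seq_list for_qual_list rev_seq_list rev_qual_list mode final_number_of_pairs out) := by unfold Spec_write_pair; infer_instance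

-- ===== CLAIM (what is proved, stated in full; the proofs are below) =====
def Claim_equal_write_pair : Prop := ∀ (new_reads_for : String) (new_reads_rev : String) (name : String) (for_seq_list : List String) (for_qual_list : List String) (rev_seq_list : List String) (rev_qual_list : List String) (mode : String) (final_number_of_pairs : Int), Dom_write_pair new_reads_for new_reads_rev name for_seq_list for_qual_list rev_seq_list rev_qual_list mode final_number_of_pairs → Pre_write_pair new_reads_for new_reads_rev name for_seq_list for_qual_list rev_seq_list rev_qual_list mode final_number_of_pairs → Spec_write_pair new_reads_for new_reads_rev name for_seq_list for_qual_list rev_seq_list rev_qual_list mode final_number_of_pairs (write_pair new_reads_for new_reads_rev name for_seq_list for_qual_list rev_seq_list rev_qual_list mode final_number_of_pairs)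

-- ===== LEMMAS AND PROOFS =====
-- A guarded loop whose guard never fires is the identity.
theorem pv_guard_none {σ : Type} (l : List Int) (p : Int → Prop) [DecidablePred p]
    (g : σ → Int → σ) (st : σ) (h : ∀ x ∈ l, ¬ p x) :
    l.foldl (fun s j => if p j then g s j else s) st = st := by
  rw [PySem.List.foldl_congr_mem _ _ (fun s _ => s) st
    (fun acc x hx => by rw [if_neg (h x hx)])]
  simp

-- Scanning range(a, b) but keeping only j ≥ c IS scanning range(c, b).
theorem pv_guard_ge {σ : Type} (a c b : Int) (h1 : a ≤ c) (h2 : c ≤ b)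
    (g : σ → Int → σ) (st : σ) :
    (PySem.List.pyRange a b 1).foldl (fun s j => if c ≤ j then g s j else s) st
      = (PySem.List.pyRange c b 1).foldl g st := by
  rw [PySem.List.pyRange_one_append a c b h1 h2, List.foldl_append,
    pv_guard_none (PySem.List.pyRange a c 1) _ _ _ (fun x hx => by rw [PySem.List.mem_pyRange_one] at hx; omega)]
  exact PySem.List.foldl_congr_mem _ _ _ _
    (fun acc x hx => by rw [PySem.List.mem_pyRange_one] at hx; rw [if_pos (by omega)])

-- Scanning range(a, b) but keeping only j = t fires at most once.
theorem pv_guard_eq {σ : Type} (a b t : Int) (g : σ → Int → σ) (st : σ) :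
    (PySem.List.pyRange a b 1).foldl (fun s j => if j = t then g s j else s) st
      = if a ≤ t ∧ t < b then g st t else st := by
  by_cases h : a ≤ t ∧ t < b
  · rw [if_pos h, PySem.List.pyRange_one_append a t b h.1 (by omega), List.foldl_append,
      pv_guard_none (PySem.List.pyRange a t 1) _ _ _ (fun x hx => by rw [PySem.List.mem_pyRange_one] at hx; omega),
      PySem.List.pyRange_one_cons h.2, List.foldl_cons, if_pos rfl,
      pv_guard_none (PySem.List.pyRange (t+1) b 1) _ _ _ (fun x hx => by rw [PySem.List.mem_pyRange_one] at hx; omega)]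
  · rw [if_neg h,
      pv_guard_none _ _ _ _ (fun x hx => by rw [PySem.List.mem_pyRange_one] at hx; omega)]

-- pile: keeping only j = i + 1 in the full pair scan is the adjacent-pairs loop.
theorem pv_pile {σ : Type} (n : Int) (e : σ → Int → Int → σ) (st : σ) :
    (PySem.List.pyRange 0 n 1).foldl (fun st1 i =>
      (PySem.List.pyRange (i + 1) n 1).foldl (fun s j => if j == i + 1 then e s i j else s) st1) st
      = (PySem.List.pyRange 0 (n - 1) 1).foldl (fun s i => e s i (i + 1)) st := by
  rw [PySem.List.foldl_congr_mem _ _ (fun s i => if i + 1 < n then e s i (i + 1) else s) st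
    (fun acc i _ => by
      simp only [beq_iff_eq]
      rw [pv_guard_eq (i + 1) n (i + 1) (fun s j => e s i j) acc]
      by_cases h : i + 1 < n
      · rw [if_pos ⟨le_refl _, h⟩, if_pos h]
      · rw [if_neg (by omega), if_neg h])]
  by_cases hn : 1 ≤ n
  · rw [PySem.List.pyRange_one_append 0 (n - 1) n (by omega) (by omega), List.foldl_append,
      PySem.List.foldl_congr_mem (PySem.List.pyRange 0 (n-1) 1) _ (fun s i => e s i (i + 1)) st
        (fun acc i hi => by rw [PySem.List.mem_pyRange_one] at hi; rw [if_pos (by omega)]),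
      show PySem.List.pyRange (n-1) n 1 = [n-1] by rw [PySem.List.pyRange_one_cons (by omega), PySem.List.pyRange_one_eq_nil (by omega)]]
    simp only [List.foldl_cons, List.foldl_nil]
    rw [if_neg (by omega)]
  · rw [PySem.List.pyRange_one_eq_nil (show n ≤ 0 by omega), PySem.List.pyRange_one_eq_nil (show n - 1 ≤ 0 by omega)]
    rfl

-- for_vs_rev: keeping only i < nf ≤ j in the full pair scan over the nf + nr combined
-- indices is the forward × reverse double loop (reverse index shifted by nf).
theorem pv_fvr {σ : Type} (nf nr : Int) (hnf : 0 ≤ nf) (hnr : 0 ≤ nr)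
    (e : σ → Int → Int → σ) (e' : σ → Int → Nat → σ) (st : σ)
    (he : ∀ (s : σ) (i : Int) (k : Nat), 0 ≤ i → i < nf → e s i (nf + (k : Int)) = e' s i k) :
    (PySem.List.pyRange 0 (nf + nr) 1).foldl (fun st1 i =>
      (PySem.List.pyRange (i + 1) (nf + nr) 1).foldl (fun s j => if i < nf ∧ nf ≤ j then e s i j else s) st1) st
      = (PySem.List.pyRange 0 nf 1).foldl (fun st1 i =>
          (List.range nr.toNat).foldl (fun s (k : Nat) => e' s i k) st1) st := by
  rw [PySem.List.pyRange_one_append 0 nf (nf + nr) hnf (by omega), List.foldl_append,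
    PySem.List.foldl_congr_mem (PySem.List.pyRange nf (nf+nr) 1) _ (fun s _ => s) _
      (fun acc i hi => by
        rw [PySem.List.mem_pyRange_one] at hi
        exact pv_guard_none _ _ _ _ (fun x _ => by omega))]
  simp only [List.foldl_fixed]
  refine PySem.List.foldl_congr_mem _ _ _ _ (fun acc i hi => ?_)
  rw [PySem.List.mem_pyRange_one] at hi
  rw [PySem.List.foldl_congr_mem _ _ (fun s j => if nf ≤ j then e s i j else s) acc
    (fun a x _ => by
      by_cases h : nf ≤ x <;> simp [h, hi.2]),
    pv_guard_ge (i + 1) nf (nf + nr) (by omega) (by omega),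
    PySem.List.pyRange_one nf (nf + nr), List.foldl_map, add_sub_cancel_left]
  exact PySem.List.foldl_congr_mem _ _ _ _ (fun a k _ => he a i k hi.1 hi.2)

-- A's for_vs_rev emission step, as one record (used to instantiate pv_fvr).
def pvEmitA (name : String) (fsl fql rsl rql : List String)
    (s : List Char × List Char × Int) (i : Int) (k : Nat) : List Char × List Char × Int :=
  (s.1 ++ pvBlock name (PySem.Int.toChars i ++ PySem.Int.toChars (k : Int)) (pvIdx fsl i) (pvIdx fql i),
   s.2.1 ++ pvBlock name (PySem.Int.toChars i ++ PySem.Int.toChars (k : Int)) (pvIdx rsl (k : Int)) (pvIdx rql (k : Int)),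
   s.2.2 + 1)

-- ===== VERDICT (by name: the statement is the Claim_ definition above) =====
theorem write_pair_spec : Claim_equal_write_pair := by
  intro nf0 nr0 name fsl fql rsl rql mode c _ _
  unfold Spec_write_pair write_pair write_pair_alt
  by_cases h1 : mode = "for_vs_rev"
  · subst h1
    simp only [String.reduceEq, reduceIte, decide_eq_true_eq]
    rw [pv_fvr (PySem.List.len fsl) (PySem.List.len rsl)
      (by simp [PySem.List.len_eq]) (by simp [PySem.List.len_eq])
      _ (pvEmitA name fsl fql rsl rql) _
      (by
        intro s i k h0 h1
        rw [PySem.List.len_eq] at h1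
        simp [pvEmitA, pvBlock, h1, show ¬ ((k : Int) < 0) by omega])]
    simp only [PySem.List.pyRange_one 0 (PySem.List.len rsl), List.foldl_map, sub_zero, zero_add]
    simp [pvEmitA, pvBlock, List.append_assoc]
  · by_cases h2 : mode = "all"
    · subst h2
      simp only [String.reduceEq, reduceIte]
      simp [pvBlock, List.append_assoc]
    · by_cases h3 : mode = "pile"
      · subst h3
        simp only [String.reduceEq, reduceIte, false_or, if_true]
        rw [pv_pile]
        simp [pvBlock, List.append_assoc]
      · simp [h1, h2, h3]
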